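-- pv_equiv track=rewrite | github.com/jovialen/dna-to-rna | modules/amino_acid_to_proteins.py | amino_acid_to_proteins
-- ===== SOURCE A (Python) =====
-- STOP_AMINO = "$"
--
-- def amino_acid_to_proteins(amino_acids):
--     proteins = []
--     build_protein = []
--
--     for amino in amino_acids:
--         if amino == STOP_AMINO:
--             if len(build_protein) > 0:
--                 proteins.append(build_protein)
--                 build_protein = []
--         else:
--             build_protein.append(amino)
--
--     if len(build_protein) > 0:
--         proteins.append(build_protein)
--
--     return proteins
-- ===== SOURCE B (Python) =====
-- STOP_AMINO = "$"
--
-- def amino_acid_to_proteins(amino_acids):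
--     proteins = []
--     i, n = 0, len(amino_acids)
--     while i < n:
--         if amino_acids[i] == STOP_AMINO:
--             i += 1
--         else:
--             j = i
--             while j < n and amino_acids[j] != STOP_AMINO:
--                 j += 1
--             proteins.append(amino_acids[i:j])
--             i = j
--     return proteins
-- ===== Notes on version B (the rewrite author's own statement) =====
-- stated objective: alternative
-- what changed: Replaces the element-by-element accumulator loop with index-based span scanning: skip stop markers, find the end of each non-stop run with an inner scan, and append the slice for that run.
import Mathlib
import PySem

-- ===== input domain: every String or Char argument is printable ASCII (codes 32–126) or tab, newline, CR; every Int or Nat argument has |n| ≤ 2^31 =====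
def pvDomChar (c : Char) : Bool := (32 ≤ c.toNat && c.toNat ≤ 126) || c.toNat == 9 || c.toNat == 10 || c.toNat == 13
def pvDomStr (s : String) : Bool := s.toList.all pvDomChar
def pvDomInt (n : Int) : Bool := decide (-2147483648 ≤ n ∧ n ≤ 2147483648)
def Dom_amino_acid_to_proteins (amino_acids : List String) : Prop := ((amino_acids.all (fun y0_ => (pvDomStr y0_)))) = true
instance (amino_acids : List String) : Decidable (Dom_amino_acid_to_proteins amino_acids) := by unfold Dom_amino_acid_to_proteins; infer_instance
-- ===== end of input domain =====

-- B replaces A's element-accumulator loop with span scanning (skip stops, take each non-stop run whole); alternative decomposition, same cost.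


-- ===== PORT A =====
-- one step of A's for-loop over (proteins, build_protein)
def aStep (st : List (List String) × List String) (amino : String) : List (List String) × List String :=
  if amino = "$" then
    if st.2.length > 0 then (st.1 ++ [st.2], []) else st
  else
    (st.1, st.2 ++ [amino])

def amino_acid_to_proteins (amino_acids : List String) : List (List String) :=
  let st := amino_acids.foldl aStep ([], [])
  if st.2.length > 0 then st.1 ++ [st.2] else st.1

-- ===== PORT B =====
-- B's outer while-loop: skip a stop, or scan the whole non-stop run (inner while = takeWhile, i := j = dropWhile)
def altGo : List String → List (List String)
  | [] => []
  | a :: rest =>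
    if a = "$" then altGo rest
    else (a :: rest.takeWhile (· ≠ "$")) :: altGo (rest.dropWhile (· ≠ "$"))
termination_by xs => xs.length
decreasing_by
  · simp
  · have := List.length_dropWhile_le (p := fun x => !decide (x = "$")) (l := rest); simp; omega

def amino_acid_to_proteins_alt (amino_acids : List String) : List (List String) :=
  altGo amino_acids

-- ===== PRECONDITION & SPEC =====
def Spec_amino_acid_to_proteins (amino_acids : List String) (out : List (List String)) : Prop := out = amino_acid_to_proteins_alt amino_acids
instance (amino_acids : List String) (out : List (List String)) : Decidable (Spec_amino_acid_to_proteins amino_acids out) := by unfold Spec_amino_acid_to_proteins; infer_instance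

-- ===== CLAIM (what is proved, stated in full; the proofs are below) =====
def Claim_equal_amino_acid_to_proteins : Prop := ∀ (amino_acids : List String), Dom_amino_acid_to_proteins amino_acids → Spec_amino_acid_to_proteins amino_acids (amino_acid_to_proteins amino_acids)

-- ===== LEMMAS AND PROOFS =====

-- closed recursive characterisation of A's fold with pending protein b
def gA : List String → List String → List (List String)
  | b, [] => if b = [] then [] else [b]
  | b, x :: xs => if x = "$" then (if b = [] then gA [] xs else b :: gA [] xs) else gA (b ++ [x]) xs

lemma finish_foldl (xs : List String) : ∀ (ps : List (List String)) (b : List String),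
    (if (xs.foldl aStep (ps, b)).2.length > 0 then (xs.foldl aStep (ps, b)).1 ++ [(xs.foldl aStep (ps, b)).2]
     else (xs.foldl aStep (ps, b)).1) = ps ++ gA b xs := by
  induction xs with
  | nil =>
    intro ps b
    rcases b with _ | ⟨y, ys⟩ <;> simp [gA]
  | cons x xs ih =>
    intro ps b
    by_cases hx : x = "$"
    · subst hx
      rcases b with _ | ⟨y, ys⟩
      · simpa [aStep, gA] using ih ps []
      · simpa [aStep, gA] using ih (ps ++ [y :: ys]) []
    · simpa [aStep, hx, gA] using ih ps (b ++ [x])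

lemma gA_eq (xs : List String) :
    gA [] xs = altGo xs ∧ ∀ b : List String, b ≠ [] →
      gA b xs = (b ++ xs.takeWhile (· ≠ "$")) :: altGo (xs.dropWhile (· ≠ "$")) := by
  induction xs with
  | nil => exact ⟨by simp [gA, altGo], by intro b hb; simp [gA, altGo, hb]⟩
  | cons x xs ih =>
    by_cases hx : x = "$"
    · subst hx
      refine ⟨by simp [gA, altGo, ih.1], ?_⟩
      intro b hb
      simp [gA, altGo, hb, List.takeWhile, List.dropWhile, ih.1]
    · constructor
      · have h := ih.2 [x] (by simp)
        simp [gA, altGo, hx, h]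
      · intro b hb
        have h := ih.2 (b ++ [x]) (by simp)
        simp only [gA, if_neg hx, h, List.takeWhile, List.dropWhile]
        simp [hx]

-- ===== VERDICT (by name: the statement is the Claim_ definition above) =====
theorem amino_acid_to_proteins_spec : Claim_equal_amino_acid_to_proteins := by
  intro xs _
  show _ = _
  have := finish_foldl xs [] []
  simp only [amino_acid_to_proteins, amino_acid_to_proteins_alt, List.nil_append] at this ⊢
  rw [this, (gA_eq xs).1]
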